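-- pv_equiv track=rewrite | github.com/lluisvalerodelai/IB_Scheduling_Algorithm | Initial Attempts/V1-ScheduleMaker.py | put_students_in_class
-- ===== SOURCE A (Python) =====
-- def put_students_in_class(grade):
--     #class list
--     #go through each student, each student that has a class in its list, add its index to specific class
--     #in the end example for a class should look like: english = [0, 2, 4, 6, 13, 14, 17, ..., n]
--     english_lit = []
--     self_taught = []
--     finnish_lit = []
--     english_b = []
--     french_b = []
--     spanish_b = []
--     finnish_b = []
--     economics = []
--     history = []
--     itgs = []
--     physcology = []
--     ess = []
--     biology = []
--     chemistry = []
--     physics = []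
--     math_analysis = []
--     math_apps = []
--     film = []
--     art = []
--     for i, student in enumerate(grade):
--         if 'english lang & lit' in student:
--             english_lit.append(i)
--         if 'self-taught lit' in student:
--             self_taught.append(i)
--         if 'finnish literature' in student:
--            finnish_lit.append(i)
--         if 'english b' in student:
--             english_b.append(i)
--         if 'french b' in student:
--             french_b.append(i)
--         if 'spanish b' in student:
--             spanish_b.append(i)
--         if 'finnish b' in student:
--             finnish_b.append(i)
--         if 'economics' in student:
--             economics.append(i)
--         if 'history' in student:
--             history.append(i)
--         if 'itgs' in student:
--             itgs.append(i)
--         if 'physcology' in student: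
--             physcology.append(i)
--         if 'ess' in student:
--             ess.append(i)
--         if 'biology' in student:
--             biology.append(i)
--         if 'chemistry' in student:
--             chemistry.append(i)
--         if 'physics' in student:
--             physics.append(i)
--         if 'math analysis' in student:
--             math_analysis.append(i)
--         if 'math applications' in student:
--             math_apps.append(i)
--         if 'film' in student:
--             film.append(i)
--         if 'art' in student:
--             art.append(i)
--     return [english_lit, english_b, finnish_lit, self_taught, french_b, spanish_b, finnish_b, economics, history, itgs, physcology, ess, biology, chemistry, physics, math_analysis, math_apps, film, art]
-- ===== SOURCE B (Python) =====
-- SUBJECTS = ['english lang & lit', 'english b', 'finnish literature', 'self-taught lit',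
--             'french b', 'spanish b', 'finnish b', 'economics', 'history', 'itgs',
--             'physcology', 'ess', 'biology', 'chemistry', 'physics',
--             'math analysis', 'math applications', 'film', 'art']
--
-- def put_students_in_class(grade):
--     return [[i for i, student in enumerate(grade) if subj in student] for subj in SUBJECTS]
-- ===== Notes on version B (the rewrite author's own statement) =====
-- stated objective: idiomatic
-- what changed: Replaced A's single pass with 19 named accumulator lists and 19 inline membership ifs by an ordered subject table and a nested list comprehension (subjects outer, students inner).
import Mathlib
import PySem

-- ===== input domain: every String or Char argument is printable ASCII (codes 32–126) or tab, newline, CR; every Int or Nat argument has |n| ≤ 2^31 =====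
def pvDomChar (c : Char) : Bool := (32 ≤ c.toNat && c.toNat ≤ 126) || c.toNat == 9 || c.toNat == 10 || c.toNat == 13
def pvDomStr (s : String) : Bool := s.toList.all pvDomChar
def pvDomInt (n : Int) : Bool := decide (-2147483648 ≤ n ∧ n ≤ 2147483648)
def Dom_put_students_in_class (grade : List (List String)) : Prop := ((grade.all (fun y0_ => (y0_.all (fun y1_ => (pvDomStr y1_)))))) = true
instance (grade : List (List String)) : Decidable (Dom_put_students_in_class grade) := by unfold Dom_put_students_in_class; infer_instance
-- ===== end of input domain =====

-- B replaces A's 19 named accumulator lists and 19 inline membership checks by a single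
-- comprehension over an ordered subject table (simpler/idiomatic; same exact output).

-- ===== PORT A =====
-- A's loop over enumerate(grade) carrying its 19 accumulator lists (positional order = A's return order).
def pvLoop (l : List (Int × List String)) (a1 a2 a3 a4 a5 a6 a7 a8 a9 a10 a11 a12 a13 a14 a15 a16 a17 a18 a19 : List Int) : List (List Int) :=
  match l with
  | [] => [a1, a2, a3, a4, a5, a6, a7, a8, a9, a10, a11, a12, a13, a14, a15, a16, a17, a18, a19]
  | p :: rest =>
    pvLoop rest
      (if p.2.contains "english lang & lit" then a1 ++ [p.1] else a1)
      (if p.2.contains "english b" then a2 ++ [p.1] else a2)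
      (if p.2.contains "finnish literature" then a3 ++ [p.1] else a3)
      (if p.2.contains "self-taught lit" then a4 ++ [p.1] else a4)
      (if p.2.contains "french b" then a5 ++ [p.1] else a5)
      (if p.2.contains "spanish b" then a6 ++ [p.1] else a6)
      (if p.2.contains "finnish b" then a7 ++ [p.1] else a7)
      (if p.2.contains "economics" then a8 ++ [p.1] else a8)
      (if p.2.contains "history" then a9 ++ [p.1] else a9)
      (if p.2.contains "itgs" then a10 ++ [p.1] else a10)
      (if p.2.contains "physcology" then a11 ++ [p.1] else a11)
      (if p.2.contains "ess" then a12 ++ [p.1] else a12)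
      (if p.2.contains "biology" then a13 ++ [p.1] else a13)
      (if p.2.contains "chemistry" then a14 ++ [p.1] else a14)
      (if p.2.contains "physics" then a15 ++ [p.1] else a15)
      (if p.2.contains "math analysis" then a16 ++ [p.1] else a16)
      (if p.2.contains "math applications" then a17 ++ [p.1] else a17)
      (if p.2.contains "film" then a18 ++ [p.1] else a18)
      (if p.2.contains "art" then a19 ++ [p.1] else a19)

def put_students_in_class (grade : List (List String)) : List (List Int) :=
  pvLoop (PySem.List.enumerate grade 0) [] [] [] [] [] [] [] [] [] [] [] [] [] [] [] [] [] [] []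

-- ===== PORT B =====
def pvSubjects : List String := ["english lang & lit", "english b", "finnish literature", "self-taught lit", "french b", "spanish b", "finnish b", "economics", "history", "itgs", "physcology", "ess", "biology", "chemistry", "physics", "math analysis", "math applications", "film", "art"]

def put_students_in_class_alt (grade : List (List String)) : List (List Int) :=
  pvSubjects.map (fun subj =>
    ((PySem.List.enumerate grade 0).filter (fun p => p.2.contains subj)).map (fun p => p.1))

-- ===== PRECONDITION & SPEC =====
def Spec_put_students_in_class (grade : List (List String)) (out : List (List Int)) : Prop := out = put_students_in_class_alt grade
instance (grade : List (List String)) (out : List (List Int)) : Decidable (Spec_put_students_in_class grade out) := by unfold Spec_put_students_in_class; infer_instance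

-- ===== CLAIM (what is proved, stated in full; the proofs are below) =====
def Claim_equal_put_students_in_class : Prop := ∀ (grade : List (List String)), Dom_put_students_in_class grade → Spec_put_students_in_class grade (put_students_in_class grade)

-- ===== LEMMAS AND PROOFS =====
def pvColl (c : String) (l : List (Int × List String)) : List Int :=
  (l.filter (fun p => p.2.contains c)).map (fun p => p.1)

lemma pvColl_cons (c : String) (p : Int × List String) (l : List (Int × List String)) :
    pvColl c (p :: l) = (if p.2.contains c then [p.1] else []) ++ pvColl c l := by
  by_cases h : c ∈ p.2 <;> simp [pvColl, h]

lemma pvAccStep (b : Bool) (a t : List Int) (x : Int) :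
    (if b then a ++ [x] else a) ++ t = a ++ ((if b then [x] else []) ++ t) := by
  cases b <;> simp

lemma pvLoop_eq (l : List (Int × List String)) (a1 a2 a3 a4 a5 a6 a7 a8 a9 a10 a11 a12 a13 a14 a15 a16 a17 a18 a19 : List Int) :
    pvLoop l a1 a2 a3 a4 a5 a6 a7 a8 a9 a10 a11 a12 a13 a14 a15 a16 a17 a18 a19 = [a1 ++ pvColl "english lang & lit" l, a2 ++ pvColl "english b" l, a3 ++ pvColl "finnish literature" l, a4 ++ pvColl "self-taught lit" l, a5 ++ pvColl "french b" l, a6 ++ pvColl "spanish b" l, a7 ++ pvColl "finnish b" l, a8 ++ pvColl "economics" l, a9 ++ pvColl "history" l, a10 ++ pvColl "itgs" l, a11 ++ pvColl "physcology" l, a12 ++ pvColl "ess" l, a13 ++ pvColl "biology" l, a14 ++ pvColl "chemistry" l, a15 ++ pvColl "physics" l, a16 ++ pvColl "math analysis" l, a17 ++ pvColl "math applications" l, a18 ++ pvColl "film" l, a19 ++ pvColl "art" l] := by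
  induction l generalizing a1 a2 a3 a4 a5 a6 a7 a8 a9 a10 a11 a12 a13 a14 a15 a16 a17 a18 a19 with
  | nil => simp [pvLoop, pvColl]
  | cons p rest ih =>
    rw [pvLoop, ih]
    simp only [pvColl_cons, pvAccStep]

-- ===== VERDICT (by name: the statement is the Claim_ definition above) =====
theorem put_students_in_class_spec : Claim_equal_put_students_in_class := by
  intro grade _
  show _ = _
  rw [put_students_in_class, pvLoop_eq]
  simp [put_students_in_class_alt, pvSubjects, pvColl]
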